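-- pv_equiv track=rewrite | github.com/trnightkid/Mylottery | lottery_spider_v2.py | merge_and_deduplicate
-- ===== SOURCE A (Python) =====
-- def merge_and_deduplicate(existing_data, new_data):
--     """合并数据并去重"""
--     seen = set()
--     merged = []
--
--     # 先加新数据
--     for d in new_data:
--         if d['period'] not in seen:
--             seen.add(d['period'])
--             merged.append(d)
--
--     # 再加已有数据
--     for d in existing_data:
--         if d['period'] not in seen:
--             seen.add(d['period'])
--             merged.append(d)
--
--     # 按期号排序
--     merged.sort(key=lambda x: x['period'], reverse=True)
--     return merged
-- ===== SOURCE B (Python) =====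
-- def merge_and_deduplicate(existing_data, new_data):
--     """合并数据并去重"""
--     ordered = sorted(new_data + existing_data, key=lambda x: x['period'], reverse=True)
--     result = []
--     for d in ordered:
--         if not result or result[-1]['period'] != d['period']:
--             result.append(d)
--     return result
-- ===== Notes on version B (the rewrite author's own statement) =====
-- stated objective: simpler
-- what changed: Instead of dedup-with-a-seen-set followed by a stable descending sort, B stably sorts new_data+existing_data descending by 'period' first and then removes adjacent duplicate periods by comparing each record with the last one kept, eliminating the seen set entirely.
import Mathlib
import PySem

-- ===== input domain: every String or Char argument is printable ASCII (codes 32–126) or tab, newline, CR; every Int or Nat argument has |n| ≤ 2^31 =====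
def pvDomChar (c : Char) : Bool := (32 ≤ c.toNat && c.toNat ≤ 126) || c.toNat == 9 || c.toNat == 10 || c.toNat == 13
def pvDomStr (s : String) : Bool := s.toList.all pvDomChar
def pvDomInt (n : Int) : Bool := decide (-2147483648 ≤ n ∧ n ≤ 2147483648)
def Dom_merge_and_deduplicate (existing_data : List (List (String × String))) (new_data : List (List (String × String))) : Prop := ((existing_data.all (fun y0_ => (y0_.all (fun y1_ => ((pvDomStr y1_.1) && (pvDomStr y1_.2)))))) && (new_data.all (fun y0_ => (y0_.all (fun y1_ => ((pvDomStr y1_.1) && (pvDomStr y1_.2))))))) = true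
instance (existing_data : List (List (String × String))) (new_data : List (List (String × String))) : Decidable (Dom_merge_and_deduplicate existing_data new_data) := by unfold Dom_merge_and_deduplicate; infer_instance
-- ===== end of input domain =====

-- B replaces A's seen-set dedup followed by a stable descending sort with: stable descending sort of
-- new_data+existing_data first, then a single pass dropping records whose 'period' equals the last kept one.
-- Return-value equivalence only; neither version mutates its arguments observably (A sorts a fresh list).

-- d['period'] (dict lookup; Pre_ guarantees the key is present, so the default is never used)
def pvPeriod (d : List (String × String)) : String := ((PySem.Dict.mk d).get? "period").getD ""

-- ===== PORT A =====
-- body of A's two identical for-loops: state = (seen, merged)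
def pvStep (st : PySem.Set String × List (List (String × String))) (d : List (String × String)) :
    PySem.Set String × List (List (String × String)) :=
  if PySem.Set.contains st.1 (pvPeriod d) then st
  else (PySem.Set.add st.1 (pvPeriod d), st.2 ++ [d])

def merge_and_deduplicate (existing_data : List (List (String × String))) (new_data : List (List (String × String))) : List (List (String × String)) :=
  let st1 := new_data.foldl pvStep (PySem.Set.empty, [])
  let st2 := existing_data.foldl pvStep st1
  PySem.List.sorted st2.2 pvPeriod true

-- ===== PORT B =====
-- body of B's loop: append d unless the last appended record has the same 'period'
def pvAdjStep (res : List (List (String × String))) (d : List (String × String)) :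
    List (List (String × String)) :=
  match res.getLast? with
  | none => res ++ [d]
  | some r => if pvPeriod r ≠ pvPeriod d then res ++ [d] else res

def merge_and_deduplicate_alt (existing_data : List (List (String × String))) (new_data : List (List (String × String))) : List (List (String × String)) :=
  let ordered := PySem.List.sorted (new_data ++ existing_data) pvPeriod true
  ordered.foldl pvAdjStep []

-- ===== PRECONDITION & SPEC =====
-- Pre_: every record carries the key "period" — exactly where Python A returns (else d['period'] raises KeyError).
def Pre_merge_and_deduplicate (existing_data : List (List (String × String))) (new_data : List (List (String × String))) : Prop :=
  ((existing_data ++ new_data).all (fun d => ((PySem.Dict.mk d).get? "period").isSome)) = true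
instance (existing_data : List (List (String × String))) (new_data : List (List (String × String))) : Decidable (Pre_merge_and_deduplicate existing_data new_data) := by unfold Pre_merge_and_deduplicate; infer_instance

def pvWitness_merge_and_deduplicate : (List (List (String × String))) × (List (List (String × String))) :=
  ([[("period", "20240101"), ("red", "1 2 3")]], [[("period", "20240102")], [("period", "20240101"), ("red", "9")]])

def Spec_merge_and_deduplicate (existing_data : List (List (String × String))) (new_data : List (List (String × String))) (out : List (List (String × String))) : Prop := out = merge_and_deduplicate_alt existing_data new_data
instance (existing_data : List (List (String × String))) (new_data : List (List (String × String))) (out : List (List (String × String))) : Decidable (Spec_merge_and_deduplicate existing_data new_data out) := by unfold Spec_merge_and_deduplicate; infer_instance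

-- ===== CLAIM (what is proved, stated in full; the proofs are below) =====
def Claim_equal_merge_and_deduplicate : Prop := ∀ (existing_data : List (List (String × String))) (new_data : List (List (String × String))), Dom_merge_and_deduplicate existing_data new_data → Pre_merge_and_deduplicate existing_data new_data → Spec_merge_and_deduplicate existing_data new_data (merge_and_deduplicate existing_data new_data)

-- ===== LEMMAS AND PROOFS =====

-- A's dedup loop, as a recursion (seen generalized to any list of keys)
def pvFkeep (s : List String) : List (List (String × String)) → List (List (String × String))
  | [] => []
  | d :: t => if pvPeriod d ∈ s then pvFkeep s t else d :: pvFkeep (s ++ [pvPeriod d]) t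

lemma pvFoldl_step_snd (C : List (List (String × String))) : ∀ (s : List String) (m : List (List (String × String))),
    (C.foldl pvStep (s, m)).2 = m ++ pvFkeep s C := by
  induction C with
  | nil => simp [pvFkeep]
  | cons d t ih =>
    intro s m
    by_cases h : pvPeriod d ∈ s
    · have hc : PySem.Set.contains s (pvPeriod d) = true := by
        simp [PySem.Set.contains, h]
      simp only [List.foldl_cons, pvStep, hc, if_true, pvFkeep, if_pos h]
      exact ih s m
    · have hc : PySem.Set.contains s (pvPeriod d) = false := by
        simp [PySem.Set.contains, h]
      simp only [List.foldl_cons, pvStep, hc, Bool.false_eq_true, if_false, pvFkeep]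
      rw [if_neg h]
      have hadd : PySem.Set.add s (pvPeriod d) = s ++ [pvPeriod d] := by
        simp [PySem.Set.add, PySem.Set.contains, h]
      rw [hadd, ih]
      simp

lemma pvMem_fkeep (C : List (List (String × String))) : ∀ (s : List String) (x : List (String × String)),
    x ∈ pvFkeep s C ↔ (pvPeriod x ∉ s ∧ C.find? (fun y => pvPeriod y == pvPeriod x) = some x) := by
  induction C with
  | nil => intro s x; simp [pvFkeep]
  | cons d t ih =>
    intro s x
    simp only [pvFkeep]
    by_cases h : pvPeriod d ∈ s
    · rw [if_pos h, ih]
      cases hk : (pvPeriod d == pvPeriod x) with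
      | false => simp [hk]
      | true =>
        have hx : pvPeriod x ∈ s := (eq_of_beq hk) ▸ h
        simp [hk, hx]
    · rw [if_neg h]
      simp only [List.mem_cons, ih]
      cases hk : (pvPeriod d == pvPeriod x) with
      | false =>
        have hne : pvPeriod d ≠ pvPeriod x := by simpa using hk
        simp only [List.find?_cons, hk]
        constructor
        · rintro (rfl | ⟨h1, h2⟩)
          · exact absurd rfl hne
          · exact ⟨fun hm => h1 (List.mem_append_left _ hm), h2⟩
        · rintro ⟨h1, h2⟩
          refine Or.inr ⟨?_, h2⟩
          intro hm
          rcases List.mem_append.mp hm with hm | hm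
          · exact h1 hm
          · exact hne (List.mem_singleton.mp hm).symm
      | true =>
        have heq : pvPeriod d = pvPeriod x := eq_of_beq hk
        simp only [List.find?_cons, hk]
        constructor
        · rintro (rfl | ⟨h1, h2⟩)
          · exact ⟨heq ▸ h, rfl⟩
          · exact absurd (List.mem_append_right _ (List.mem_singleton.mpr heq.symm)) h1
        · rintro ⟨h1, h2⟩
          exact Or.inl (Option.some.inj h2).symm

lemma pvFkeep_nodup (C : List (List (String × String))) : ∀ (s : List String),
    ((pvFkeep s C).map pvPeriod).Nodup := by
  induction C with
  | nil => simp [pvFkeep]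
  | cons d t ih =>
    intro s
    simp only [pvFkeep]
    by_cases h : pvPeriod d ∈ s
    · rw [if_pos h]; exact ih s
    · rw [if_neg h]
      simp only [List.map_cons, List.nodup_cons]
      refine ⟨?_, ih _⟩
      intro hmem
      rcases List.mem_map.mp hmem with ⟨x, hx, hkx⟩
      have := ((pvMem_fkeep t (s ++ [pvPeriod d]) x).mp hx).1
      exact this (hkx ▸ List.mem_append_right _ (List.mem_singleton.mpr rfl))

-- stability of the reverse insertion sort w.r.t. a fixed key value c
lemma pvFilter_insertBy (x : List (String × String)) (c : String) : ∀ (ys : List (List (String × String))),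
    ys.Pairwise (fun a b => pvPeriod b ≤ pvPeriod a) →
    (PySem.List.insertBy (fun a b => decide (pvPeriod b < pvPeriod a)) x ys).filter (fun y => pvPeriod y == c)
      = if pvPeriod x == c then ys.filter (fun y => pvPeriod y == c) ++ [x]
        else ys.filter (fun y => pvPeriod y == c) := by
  intro ys
  induction ys with
  | nil =>
    intro _
    cases hx : (pvPeriod x == c) <;> simp [PySem.List.insertBy, List.filter, hx]
  | cons y t ih =>
    intro h
    rcases List.pairwise_cons.mp h with ⟨hy, ht⟩
    simp only [PySem.List.insertBy]
    by_cases hb : pvPeriod y < pvPeriod x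
    · rw [if_pos (by simpa using hb), List.filter_cons]
      cases hx : (pvPeriod x == c) with
      | false => simp
      | true =>
        have hxc : pvPeriod x = c := eq_of_beq hx
        have hnil : (y :: t).filter (fun y => pvPeriod y == c) = [] := by
          rw [List.filter_eq_nil_iff]
          intro z hz
          have hlt : pvPeriod z < c := by
            rcases List.mem_cons.mp hz with rfl | hzt
            · exact hxc ▸ hb
            · exact lt_of_le_of_lt (hy z hzt) (hxc ▸ hb)
          simpa using ne_of_lt hlt
        simp only [hnil]
        simp
    · rw [if_neg (by simpa using hb)]
      simp only [List.filter_cons, ih ht]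
      cases hx : (pvPeriod x == c) <;> cases hyc : (pvPeriod y == c) <;>
        simp

lemma pvSorted_filter (C : List (List (String × String))) (c : String) :
    (PySem.List.sorted C pvPeriod true).filter (fun y => pvPeriod y == c)
      = C.filter (fun y => pvPeriod y == c) := by
  induction C using List.reverseRecOn with
  | nil => simp [PySem.List.sorted]
  | append_singleton C x ih =>
    rw [PySem.List.sorted_rev_eq_foldl_insertBy, List.foldl_append, List.foldl_cons, List.foldl_nil,
      ← PySem.List.sorted_rev_eq_foldl_insertBy,
      pvFilter_insertBy x c _ (PySem.List.sorted_pairwise_rev C pvPeriod), List.filter_append, ih]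
    cases hx : (pvPeriod x == c) <;> simp [List.filter, hx]

lemma pvFind?_eq_head?_filter {α : Type} (p : α → Bool) (l : List α) :
    l.find? p = (l.filter p).head? := by
  induction l with
  | nil => rfl
  | cons a t ih =>
    rw [List.find?_cons, List.filter_cons]
    cases h : p a with
    | true => rfl
    | false => exact ih

lemma pvSorted_find? (C : List (List (String × String))) (c : String) :
    (PySem.List.sorted C pvPeriod true).find? (fun y => pvPeriod y == c)
      = C.find? (fun y => pvPeriod y == c) := by
  rw [pvFind?_eq_head?_filter, pvFind?_eq_head?_filter, pvSorted_filter]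

-- B's loop, as a recursion (r = last kept record)
def pvGadj (r : List (String × String)) : List (List (String × String)) → List (List (String × String))
  | [] => [r]
  | d :: t => if pvPeriod r = pvPeriod d then pvGadj r t else r :: pvGadj d t

lemma pvAdjFold_append (S : List (List (String × String))) : ∀ (a b : List (List (String × String))), b ≠ [] →
    S.foldl pvAdjStep (a ++ b) = a ++ S.foldl pvAdjStep b := by
  induction S with
  | nil => intro a b _; simp
  | cons d t ih =>
    intro a b hb
    cases hL : b.getLast? with
    | none => exact absurd (List.getLast?_eq_none_iff.mp hL) hb
    | some r =>
      have hlast : (a ++ b).getLast? = some r := by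
        rw [List.getLast?_append, hL]; rfl
      simp only [List.foldl_cons, pvAdjStep, hlast, hL]
      by_cases hk : pvPeriod r ≠ pvPeriod d
      · rw [if_pos hk, if_pos hk, List.append_assoc]
        exact ih a (b ++ [d]) (by simp)
      · rw [if_neg hk, if_neg hk]
        exact ih a b hb

lemma pvAdjFold_gadj (S : List (List (String × String))) : ∀ (r : List (String × String)),
    S.foldl pvAdjStep [r] = pvGadj r S := by
  induction S with
  | nil => intro r; rfl
  | cons d t ih =>
    intro r
    simp only [List.foldl_cons]
    rw [show pvAdjStep [r] d = if pvPeriod r ≠ pvPeriod d then [r] ++ [d] else [r] from rfl]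
    simp only [pvGadj]
    by_cases hk : pvPeriod r = pvPeriod d
    · rw [if_neg (not_not_intro hk), if_pos hk]
      exact ih r
    · rw [if_pos hk, if_neg hk, pvAdjFold_append t [r] [d] (by simp), ih d]
      rfl

lemma pvMem_gadj (S : List (List (String × String))) : ∀ (r x : List (String × String)),
    x ∈ pvGadj r S → x = r ∨ x ∈ S := by
  induction S with
  | nil => intro r x hx; simp [pvGadj] at hx; exact Or.inl hx
  | cons d t ih =>
    intro r x hx
    simp only [pvGadj] at hx
    by_cases hk : pvPeriod r = pvPeriod d
    · rw [if_pos hk] at hx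
      rcases ih r x hx with h | h
      · exact Or.inl h
      · exact Or.inr (List.mem_cons_of_mem _ h)
    · rw [if_neg hk] at hx
      rcases List.mem_cons.mp hx with rfl | hx
      · exact Or.inl rfl
      · rcases ih d x hx with rfl | h
        · exact Or.inr (List.mem_cons_self)
        · exact Or.inr (List.mem_cons_of_mem _ h)

lemma pvGadj_pairwise (S : List (List (String × String))) : ∀ (r : List (String × String)),
    (r :: S).Pairwise (fun a b => pvPeriod b ≤ pvPeriod a) →
    (pvGadj r S).Pairwise (fun a b => pvPeriod b < pvPeriod a) := by
  induction S with
  | nil => intro r _; simp [pvGadj]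
  | cons d t ih =>
    intro r h
    rcases List.pairwise_cons.mp h with ⟨hr, hdt⟩
    simp only [pvGadj]
    by_cases hk : pvPeriod r = pvPeriod d
    · rw [if_pos hk]
      apply ih r
      rw [List.pairwise_cons]
      exact ⟨fun z hz => hr z (List.mem_cons_of_mem _ hz), (List.pairwise_cons.mp hdt).2⟩
    · rw [if_neg hk]
      rw [List.pairwise_cons]
      refine ⟨?_, ih d hdt⟩
      intro z hz
      rcases pvMem_gadj t d z hz with rfl | hzt
      · exact lt_of_le_of_ne (hr z List.mem_cons_self) (fun he => hk he.symm)
      · exact lt_of_le_of_lt ((List.pairwise_cons.mp hdt).1 z hzt)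
          (lt_of_le_of_ne (hr d List.mem_cons_self) (fun he => hk he.symm))

lemma pvMem_gadj_iff (S : List (List (String × String))) : ∀ (r x : List (String × String)),
    (r :: S).Pairwise (fun a b => pvPeriod b ≤ pvPeriod a) →
    (x ∈ pvGadj r S ↔ (r :: S).find? (fun y => pvPeriod y == pvPeriod x) = some x) := by
  induction S with
  | nil =>
    intro r x _
    rw [List.find?_cons]
    cases hk : (pvPeriod r == pvPeriod x) with
    | true =>
      simp only [pvGadj, List.mem_singleton]
      constructor
      · rintro rfl; rfl
      · intro hs; exact (Option.some.inj hs).symm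
    | false =>
      have hne : pvPeriod r ≠ pvPeriod x := by simpa using hk
      simp only [pvGadj, List.mem_singleton]
      constructor
      · rintro rfl; exact absurd rfl hne
      · intro hs; simp at hs
  | cons d t ih =>
    intro r x h
    rcases List.pairwise_cons.mp h with ⟨hr, hdt⟩
    simp only [pvGadj]
    by_cases hk : pvPeriod r = pvPeriod d
    · rw [if_pos hk]
      have h' : (r :: t).Pairwise (fun a b => pvPeriod b ≤ pvPeriod a) := by
        rw [List.pairwise_cons]
        exact ⟨fun z hz => hr z (List.mem_cons_of_mem _ hz), (List.pairwise_cons.mp hdt).2⟩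
      rw [ih r x h']
      have hbd : (pvPeriod d == pvPeriod x) = (pvPeriod r == pvPeriod x) := by rw [hk]
      cases hrx : (pvPeriod r == pvPeriod x) with
      | true => simp [hrx]
      | false => simp [hrx, hbd]
    · rw [if_neg hk]
      by_cases hrx : pvPeriod r = pvPeriod x
      · have hb : (pvPeriod r == pvPeriod x) = true := beq_iff_eq.mpr hrx
        simp only [List.mem_cons, List.find?_cons, hb]
        constructor
        · rintro (rfl | hxg)
          · rfl
          · exfalso
            rcases pvMem_gadj t d x hxg with rfl | hxt
            · exact hk hrx
            · have h1 : pvPeriod x ≤ pvPeriod d := (List.pairwise_cons.mp hdt).1 x hxt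
              have h2 : pvPeriod d ≤ pvPeriod r := hr d List.mem_cons_self
              exact hk (le_antisymm (hrx.le.trans h1) h2)
        · intro hs; exact Or.inl (Option.some.inj hs).symm
      · have hb : (pvPeriod r == pvPeriod x) = false := by simpa using hrx
        simp only [List.mem_cons]
        rw [List.find?_cons]
        simp only [hb]
        rw [← ih d x hdt]
        constructor
        · rintro (rfl | hxg)
          · exact absurd rfl hrx
          · exact hxg
        · exact Or.inr

-- ===== VERDICT (by name: the statement is the Claim_ definition above) =====
theorem merge_and_deduplicate_spec : Claim_equal_merge_and_deduplicate := by
  intro e n _ _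
  unfold Spec_merge_and_deduplicate merge_and_deduplicate merge_and_deduplicate_alt
  have hA2 : (e.foldl pvStep (n.foldl pvStep (PySem.Set.empty, []))).2 = pvFkeep [] (n ++ e) := by
    rw [← List.foldl_append]
    exact pvFoldl_step_snd (n ++ e) [] []
  simp only [hA2]
  cases hSx : PySem.List.sorted (n ++ e) pvPeriod true with
  | nil =>
    have hC : n ++ e = [] := (PySem.List.sorted_eq_nil_iff _ _ _).mp hSx
    rw [hC]
    simp [pvFkeep, PySem.List.sorted]
  | cons d t =>
    have hpair : (d :: t).Pairwise (fun a b => pvPeriod b ≤ pvPeriod a) :=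
      hSx ▸ PySem.List.sorted_pairwise_rev (n ++ e) pvPeriod
    have hBP : (d :: t).foldl pvAdjStep [] = pvGadj d t := by
      simp only [List.foldl_cons]
      rw [show pvAdjStep [] d = [d] from rfl]
      exact pvAdjFold_gadj t d
    rw [hBP]
    apply PySem.List.sorted_rev_eq_of_perm_of_pairwise_gt
    · rw [List.perm_ext_iff_of_nodup]
      · intro x
        rw [pvMem_gadj_iff t d x hpair, ← hSx, pvSorted_find?, pvMem_fkeep]
        simp
      · exact (pvGadj_pairwise t d hpair).imp (fun {a b} hlt he => absurd (he ▸ hlt) (lt_irrefl _))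
      · exact List.Nodup.of_map _ (pvFkeep_nodup (n ++ e) [])
    · exact pvGadj_pairwise t d hpair
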